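-- pv_equiv track=rewrite | github.com/klzgrad/naiveproxy | src/build/android/pylib/local/device/local_device_gtest_run.py | _GroupPreTests
-- ===== SOURCE A (Python) =====
-- _GTEST_PRETEST_PREFIX = 'PRE_'
--
-- def _GroupPreTests(tests):
--   pre_tests = dict()
--   other_tests = []
--   for test in tests:
--     test_name_start = max(test.find('.') + 1, 0)
--     test_name = test[test_name_start:]
--     if test_name_start > 0 and test_name.startswith(_GTEST_PRETEST_PREFIX):
--       test_suite = test[:test_name_start - 1]
--       trim_test = test
--       trim_tests = [test]
--
--       while test_name.startswith(_GTEST_PRETEST_PREFIX):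
--         test_name = test_name[len(_GTEST_PRETEST_PREFIX):]
--         trim_test = '%s.%s' % (test_suite, test_name)
--         trim_tests.append(trim_test)
--
--       # The trim test should exist at first place. For example, if a test has
--       # been disabled, there is no need to run PRE_ test with this test.
--       if trim_test in tests and (not trim_test in pre_tests or len(
--           pre_tests[trim_test]) < len(trim_tests)):
--         pre_tests[trim_test] = trim_tests
--     else:
--       other_tests.append(test)
--   return pre_tests, other_tests
-- ===== SOURCE B (Python) =====
-- _GTEST_PRETEST_PREFIX = 'PRE_'
--
-- def _GroupPreTests(tests):
--   # Pass 1: split each test once, count PRE_ depth; keep per base the first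
--   # maximal-depth candidate, appending non-PRE_ tests to other_tests in order.
--   other_tests = []
--   best = {}  # base test name -> (depth, suite, stripped name)
--   for test in tests:
--     dot = test.find('.')
--     if dot < 0:
--       other_tests.append(test)
--       continue
--     suite = test[:dot]
--     name = test[dot + 1:]
--     depth = 0
--     while name.startswith(_GTEST_PRETEST_PREFIX):
--       name = name[len(_GTEST_PRETEST_PREFIX):]
--       depth += 1
--     if depth == 0:
--       other_tests.append(test)
--       continue
--     base = '%s.%s' % (suite, name)
--     if base not in best or best[base][0] < depth:
--       best[base] = (depth, suite, name)
--   # Pass 2: for bases actually present, reconstruct the descending PRE_ chain.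
--   test_set = set(tests)
--   pre_tests = {}
--   for base, (depth, suite, name) in best.items():
--     if base in test_set:
--       pre_tests[base] = [
--           '%s.%s' % (suite, _GTEST_PRETEST_PREFIX * d + name)
--           for d in reversed(range(depth + 1))
--       ]
--   return pre_tests, other_tests
-- ===== Notes on version B (the rewrite author's own statement) =====
-- stated objective: alternative
-- what changed: Instead of rebuilding the whole PRE_ chain and conditionally reinserting it for every PRE_ test, B makes one pass that splits each test once, counts its PRE_ depth and keeps per base only the first deepest candidate, then a second pass reconstructs each winning chain and filters by a membership set built once from tests.
import Mathlib
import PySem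

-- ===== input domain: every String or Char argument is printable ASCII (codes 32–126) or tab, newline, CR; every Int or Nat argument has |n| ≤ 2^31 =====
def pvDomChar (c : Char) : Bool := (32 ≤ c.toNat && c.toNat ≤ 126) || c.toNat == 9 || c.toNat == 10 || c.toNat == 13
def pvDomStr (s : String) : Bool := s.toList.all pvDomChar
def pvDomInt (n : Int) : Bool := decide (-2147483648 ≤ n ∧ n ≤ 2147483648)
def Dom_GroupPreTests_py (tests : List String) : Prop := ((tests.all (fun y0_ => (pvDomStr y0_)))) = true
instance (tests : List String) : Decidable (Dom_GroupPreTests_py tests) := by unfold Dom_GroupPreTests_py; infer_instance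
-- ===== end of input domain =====

-- B replaces A's per-test while-loop that rebuilds and reinserts the whole PRE_ chain by a
-- one-pass per-base maximum-depth selection followed by a reconstruction pass (objective: alternative).
-- Strings are handled as their character lists (PySem.Chars / PySem.List primitives), exact on ASCII.

-- ===== PORT A =====
def GroupPreTests_prefix : String := "PRE_"

-- cited by the termination proofs of the while-loop ports
lemma pre_prefix_four_le {name : List Char}
    (h : PySem.Chars.startswith name GroupPreTests_prefix.toList = true) : 4 ≤ name.length := by
  have hp : GroupPreTests_prefix.toList <+: name := (PySem.Chars.startswith_iff _ _).mp h
  have h4 : GroupPreTests_prefix.toList.length = 4 := by decide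
  have := hp.length_le
  omega

-- test_name[len(_GTEST_PRETEST_PREFIX):] — cited by termination proofs and the equivalence lemmas
lemma slice_pre_eq (name : List Char) :
    PySem.List.slice name (some (PySem.Chars.len GroupPreTests_prefix.toList)) none = name.drop 4 := by
  have h : PySem.Chars.len GroupPreTests_prefix.toList = ((4 : Nat) : Int) := by decide
  rw [h, PySem.List.slice_from_natCast]

-- A's 'while test_name.startswith(PRE_)' loop, carrying trim_test and trim_tests
def preA_while (suite : List Char) (name : List Char) (trimTest : List Char)
    (trimTests : List (List Char)) : List Char × List (List Char) :=
  if h : PySem.Chars.startswith name GroupPreTests_prefix.toList then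
    let name' := PySem.List.slice name (some (PySem.Chars.len GroupPreTests_prefix.toList)) none
    let trimTest' := suite ++ '.' :: name'          -- '%s.%s' % (test_suite, test_name)
    preA_while suite name' trimTest' (trimTests ++ [trimTest'])
  else (trimTest, trimTests)
termination_by name.length
decreasing_by
  simp only [slice_pre_eq, List.length_drop]
  have := pre_prefix_four_le h
  omega

-- the body of A's 'for test in tests' loop
def stepA (tests : List String) (st : PySem.Dict String (List String) × List String)
    (test : String) : PySem.Dict String (List String) × List String :=
  let testNameStart : Int := max (PySem.Str.find test "." + 1) 0
  let testName : List Char := PySem.List.slice test.toList (some testNameStart) none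
  if decide (0 < testNameStart) && PySem.Chars.startswith testName GroupPreTests_prefix.toList then
    let testSuite : List Char := PySem.List.slice test.toList none (some (testNameStart - 1))
    let r := preA_while testSuite testName test.toList [test.toList]
    let trimTest : String := String.ofList r.1
    if tests.contains trimTest &&
        (match st.1.get? trimTest with
         | none => true
         | some v => decide (v.length < r.2.length)) then
      (st.1.insert trimTest (r.2.map String.ofList), st.2)
    else st
  else (st.1, st.2 ++ [test])

def GroupPreTests_py (tests : List String) : (List (String × List String)) × List String :=
  let r := tests.foldl (stepA tests) (PySem.Dict.empty, [])
  (r.1.items, r.2)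

-- ===== PORT B =====
-- B's depth-counting while loop
def preB_depth (name : List Char) (depth : Nat) : Nat × List Char :=
  if h : PySem.Chars.startswith name GroupPreTests_prefix.toList then
    preB_depth (PySem.List.slice name (some (PySem.Chars.len GroupPreTests_prefix.toList)) none)
      (depth + 1)
  else (depth, name)
termination_by name.length
decreasing_by
  simp only [slice_pre_eq, List.length_drop]
  have := pre_prefix_four_le h
  omega

-- ['%s.%s' % (suite, 'PRE_' * d + name) for d in reversed(range(depth + 1))]
def preChain (depth : Nat) (suite : List Char) (name : List Char) : List String :=
  ((List.range (depth + 1)).reverse).map (fun (d : Nat) =>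
    String.ofList (suite ++ '.' :: (PySem.List.pyRepeat GroupPreTests_prefix.toList ((d : Nat) : Int) ++ name)))

-- the body of B's first 'for test in tests' loop
def stepB (st : PySem.Dict String (Nat × List Char × List Char) × List String)
    (test : String) : PySem.Dict String (Nat × List Char × List Char) × List String :=
  let dot : Int := PySem.Str.find test "."
  if decide (dot < 0) then (st.1, st.2 ++ [test])
  else
    let suite := PySem.List.slice test.toList none (some dot)
    let r := preB_depth (PySem.List.slice test.toList (some (dot + 1)) none) 0
    if r.1 = 0 then (st.1, st.2 ++ [test])
    else
      let base := String.ofList (suite ++ '.' :: r.2)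
      match st.1.get? base with
      | none => (st.1.insert base (r.1, suite, r.2), st.2)
      | some q => if q.1 < r.1 then (st.1.insert base (r.1, suite, r.2), st.2) else st

def GroupPreTests_py_alt (tests : List String) : (List (String × List String)) × List String :=
  let r := tests.foldl stepB (PySem.Dict.empty, [])
  let tset : PySem.Set String := PySem.Set.ofList tests
  let pre := r.1.items.foldl
    (fun d p =>
      if PySem.Set.contains tset p.1 then d.insert p.1 (preChain p.2.1 p.2.2.1 p.2.2.2) else d)
    (PySem.Dict.empty : PySem.Dict String (List String))
  (pre.items, r.2)

-- ===== PRECONDITION & SPEC =====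
def Spec_GroupPreTests_py (tests : List String) (out : (List (String × List String)) × List String) : Prop := out = GroupPreTests_py_alt tests
instance (tests : List String) (out : (List (String × List String)) × List String) : Decidable (Spec_GroupPreTests_py tests out) := by unfold Spec_GroupPreTests_py; infer_instance

-- ===== CLAIM (what is proved, stated in full; the proofs are below) =====
def Claim_equal_GroupPreTests_py : Prop := ∀ (tests : List String), Dom_GroupPreTests_py tests → Spec_GroupPreTests_py tests (GroupPreTests_py tests)

-- ===== LEMMAS AND PROOFS =====

-- 'PRE_' repeated d times
def preRep : Nat → List Char
  | 0 => []
  | d + 1 => GroupPreTests_prefix.toList ++ preRep d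

-- semantic core of both while loops: (number of leading PRE_ prefixes, remainder)
def stripPre (name : List Char) : Nat × List Char :=
  if h : PySem.Chars.startswith name GroupPreTests_prefix.toList then
    ((stripPre (name.drop 4)).1 + 1, (stripPre (name.drop 4)).2)
  else (0, name)
termination_by name.length
decreasing_by
  all_goals
    simp only [List.length_drop]
    have := pre_prefix_four_le h
    omega

def chainTail (suite n : List Char) (k : Nat) : List (List Char) :=
  ((List.range k).reverse).map (fun j => suite ++ '.' :: (preRep j ++ n))

def predIn (tests : List String) (s : String) : Bool :=
  PySem.Set.contains (PySem.Set.ofList tests) s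

-- the association list A's dict holds, computed from B's "best" items
def renderL (tests : List String) :
    List (String × (Nat × List Char × List Char)) → List (String × List String)
  | [] => []
  | p :: l =>
      if predIn tests p.1 then (p.1, preChain p.2.1 p.2.2.1 p.2.2.2) :: renderL tests l
      else renderL tests l

def renderD (tests : List String) (b : PySem.Dict String (Nat × List Char × List Char)) :
    PySem.Dict String (List String) :=
  PySem.Dict.mk (renderL tests b.items)

lemma prefix_append_drop {name : List Char}
    (h : PySem.Chars.startswith name GroupPreTests_prefix.toList = true) :
    GroupPreTests_prefix.toList ++ name.drop 4 = name := by
  obtain ⟨tl, htl⟩ := (PySem.Chars.startswith_iff _ _).mp h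
  have h4 : GroupPreTests_prefix.toList.length = 4 := by decide
  rw [← htl, ← h4, List.drop_left]

lemma stripPre_recon (name : List Char) :
    preRep (stripPre name).1 ++ (stripPre name).2 = name := by
  fun_induction stripPre name with
  | case1 name h ih =>
    simp only [preRep, List.append_assoc, ih]
    exact prefix_append_drop h
  | case2 name h => simp [preRep]

lemma stripPre_fst_zero {name : List Char}
    (h : PySem.Chars.startswith name GroupPreTests_prefix.toList = false) :
    stripPre name = (0, name) := by
  rw [stripPre, dif_neg (by simp [h])]

lemma startswith_false_of_stripPre_zero {name : List Char} (h : (stripPre name).1 = 0) :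
    PySem.Chars.startswith name GroupPreTests_prefix.toList = false := by
  cases hsw : PySem.Chars.startswith name GroupPreTests_prefix.toList with
  | false => rfl
  | true =>
    rw [stripPre, dif_pos hsw] at h
    simp at h

lemma startswith_of_stripPre_pos {name : List Char} (h : 0 < (stripPre name).1) :
    PySem.Chars.startswith name GroupPreTests_prefix.toList = true := by
  cases hsw : PySem.Chars.startswith name GroupPreTests_prefix.toList with
  | true => rfl
  | false =>
    rw [stripPre_fst_zero hsw] at h
    simp at h

lemma preB_depth_eq (name : List Char) :
    ∀ d : Nat, preB_depth name d = (d + (stripPre name).1, (stripPre name).2) := by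
  fun_induction stripPre name with
  | case1 name h ih =>
    intro d
    rw [preB_depth, dif_pos h, slice_pre_eq, ih]
    simp only [Prod.mk.injEq]
    exact ⟨by omega, trivial⟩
  | case2 name h =>
    intro d
    rw [preB_depth, dif_neg h]
    simp only [Bool.not_eq_true] at h
    simp [stripPre_fst_zero h]

lemma chainTail_succ (suite n : List Char) (k : Nat) :
    chainTail suite n (k + 1) = (suite ++ '.' :: (preRep k ++ n)) :: chainTail suite n k := by
  simp [chainTail, List.range_succ]

lemma preA_while_eq (name : List Char) :
    ∀ (suite t0 : List Char) (ts : List (List Char)),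
      preA_while suite name t0 ts =
        ((if (stripPre name).1 = 0 then t0 else suite ++ '.' :: (stripPre name).2),
          ts ++ chainTail suite (stripPre name).2 (stripPre name).1) := by
  fun_induction stripPre name with
  | case1 name h ih =>
    intro suite t0 ts
    rw [preA_while, dif_pos h]
    simp only [slice_pre_eq]
    rw [ih]
    have hrec := stripPre_recon (name.drop 4)
    rcases hsp : stripPre (name.drop 4) with ⟨k', n'⟩
    rw [hsp] at hrec
    simp only [hsp]
    cases k' with
    | zero =>
      simp only [preRep, List.nil_append] at hrec
      simp only [chainTail_succ]
      simp [hrec, chainTail, preRep]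
    | succ k0 =>
      simp only [chainTail_succ]
      simp [← hrec]
  | case2 name h =>
    intro suite t0 ts
    rw [preA_while, dif_neg h]
    simp only [Bool.not_eq_true] at h
    simp [stripPre_fst_zero h, chainTail]

lemma pyRepeat_eq_preRep (d : Nat) :
    PySem.List.pyRepeat GroupPreTests_prefix.toList ((d : Nat) : Int) = preRep d := by
  simp only [PySem.List.pyRepeat, Int.toNat_natCast]
  induction d with
  | zero => simp [preRep]
  | succ d ih => simp [preRep, List.replicate_succ, ← ih]

lemma map_reverse_range_cons {α : Type} (f : Nat → α) (k : Nat) :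
    ((List.range (k + 1)).reverse).map f = f k :: ((List.range k).reverse).map f := by
  rw [List.range_succ, List.reverse_append]
  rfl

lemma preChain_eq (k : Nat) (suite n : List Char) :
    preChain k suite n =
      String.ofList (suite ++ '.' :: (preRep k ++ n)) :: (chainTail suite n k).map String.ofList := by
  induction k with
  | zero =>
    rw [preChain, map_reverse_range_cons, chainTail]
    rw [List.range_zero, List.reverse_nil, List.map_nil, List.map_nil, List.map_nil]
    rw [pyRepeat_eq_preRep 0]
  | succ k ih =>
    have hstep : preChain (k + 1) suite n =
        String.ofList (suite ++ '.' ::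
          (PySem.List.pyRepeat GroupPreTests_prefix.toList (((k + 1 : Nat)) : Int) ++ n)) ::
          preChain k suite n := by
      rw [preChain, map_reverse_range_cons]
      rfl
    rw [hstep, ih, pyRepeat_eq_preRep, chainTail_succ, List.map_cons]

lemma length_chainTail (suite n : List Char) (k : Nat) : (chainTail suite n k).length = k := by
  simp [chainTail]

lemma length_preChain (k : Nat) (suite n : List Char) : (preChain k suite n).length = k + 1 := by
  simp [preChain]

lemma predIn_eq (tests : List String) (s : String) : tests.contains s = predIn tests s := by
  rw [Bool.eq_iff_iff]
  simp [predIn, PySem.Set.contains_iff, PySem.Set.mem_ofList]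

lemma mem_fst_renderL {tests : List String} {l : List (String × (Nat × List Char × List Char))}
    {x : String × List String} (h : x ∈ renderL tests l) : x.1 ∈ l.map (fun p => p.1) := by
  induction l with
  | nil => simp [renderL] at h
  | cons p l ih =>
    rw [renderL] at h
    by_cases hp : predIn tests p.1
    · rw [if_pos hp] at h
      rcases List.mem_cons.mp h with h | h
      · simp [h]
      · simp [ih h]
    · rw [if_neg hp] at h
      simp [ih h]

lemma renderL_append (tests : List String) (l₁ l₂ : List (String × (Nat × List Char × List Char))) :
    renderL tests (l₁ ++ l₂) = renderL tests l₁ ++ renderL tests l₂ := by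
  induction l₁ with
  | nil => simp [renderL]
  | cons p l ih =>
    rw [List.cons_append, renderL, renderL]
    split <;> simp [ih]

lemma get?_mk_none {ν : Type} {l : List (String × ν)} {b : String}
    (h : b ∉ l.map (fun p => p.1)) : (PySem.Dict.mk l).get? b = none := by
  induction l with
  | nil => simp [PySem.Dict.get?]
  | cons p l ih =>
    obtain ⟨p1, pv⟩ := p
    simp only [List.map_cons, List.mem_cons, not_or] at h
    rw [PySem.Dict.get?_mk_cons, if_neg (by simp; exact fun e => h.1 e.symm)]
    exact ih h.2

lemma get?_renderD_aux (tests : List String) (b : String) :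
    ∀ l : List (String × (Nat × List Char × List Char)), (l.map (fun p => p.1)).Nodup →
      (PySem.Dict.mk (renderL tests l)).get? b =
        if predIn tests b then
          ((PySem.Dict.mk l).get? b).map (fun q => preChain q.1 q.2.1 q.2.2)
        else none := by
  intro l
  induction l with
  | nil =>
    intro _
    simp [renderL, PySem.Dict.get?]
  | cons p l ih =>
    intro hnd
    obtain ⟨p1, pv⟩ := p
    simp only [List.map_cons, List.nodup_cons] at hnd
    rw [renderL]
    by_cases hp : predIn tests p1 = true
    · rw [if_pos hp, PySem.Dict.get?_mk_cons, PySem.Dict.get?_mk_cons]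
      by_cases hb : p1 = b
      · subst hb
        simp [hp]
      · have hbb : (p1 == b) = false := by simp [hb]
        simp only [hbb, Bool.false_eq_true, if_false]
        exact ih hnd.2
    · rw [if_neg hp]
      by_cases hb : p1 = b
      · subst hb
        have hp' : ¬ predIn tests p1 = true := hp
        have hnone : (PySem.Dict.mk (renderL tests l)).get? p1 = none := by
          apply get?_mk_none
          intro hmem
          rcases List.mem_map.mp hmem with ⟨x, hx, hx1⟩
          exact hnd.1 (hx1 ▸ mem_fst_renderL hx)
        rw [hnone, if_neg hp']
      · rw [PySem.Dict.get?_mk_cons]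
        have hbb : (p1 == b) = false := by simp [hb]
        simp only [hbb, Bool.false_eq_true, if_false]
        exact ih hnd.2

lemma get?_renderD (tests : List String) (dB : PySem.Dict String (Nat × List Char × List Char))
    (b : String) (hnd : dB.keys.Nodup) :
    (renderD tests dB).get? b =
      if predIn tests b then (dB.get? b).map (fun q => preChain q.1 q.2.1 q.2.2) else none := by
  obtain ⟨l⟩ := dB
  have hnd' : (l.map (fun p => p.1)).Nodup := by simpa [PySem.Dict.keys_mk] using hnd
  exact get?_renderD_aux tests b l hnd'

lemma mem_fst_renderL_of {tests : List String} {l : List (String × (Nat × List Char × List Char))}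
    {b : String} (hp : predIn tests b = true) (h : b ∈ l.map (fun p => p.1)) :
    b ∈ (renderL tests l).map (fun p => p.1) := by
  induction l with
  | nil => simp at h
  | cons p l ih =>
    rw [List.map_cons, List.mem_cons] at h
    rw [renderL]
    rcases h with h1 | h1
    · have hq : predIn tests p.1 = true := by rw [← h1]; exact hp
      rw [if_pos hq]
      rw [List.map_cons, List.mem_cons]
      exact Or.inl h1
    · by_cases hq : predIn tests p.1 = true
      · rw [if_pos hq, List.map_cons, List.mem_cons]
        exact Or.inr (ih h1)
      · rw [if_neg hq]
        exact ih h1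

lemma renderL_map_rep {tests : List String} {b : String} {v : Nat × List Char × List Char}
    (hp : predIn tests b = true) :
    ∀ l : List (String × (Nat × List Char × List Char)),
      renderL tests (l.map (fun p => if p.1 == b then (b, v) else p)) =
        (renderL tests l).map
          (fun p => if p.1 == b then (b, preChain v.1 v.2.1 v.2.2) else p) := by
  intro l
  induction l with
  | nil => simp [renderL]
  | cons p l ih =>
    obtain ⟨p1, pv⟩ := p
    simp only [List.map_cons]
    by_cases hb : p1 = b
    · subst hb
      simp only [beq_self_eq_true, if_true]
      simp only [renderL]
      rw [if_pos hp, if_pos hp]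
      simp only [List.map_cons, beq_self_eq_true, if_true]
      rw [ih]
    · have hbb : (p1 == b) = false := by simp [hb]
      simp only [hbb, Bool.false_eq_true, if_false]
      simp only [renderL]
      by_cases hq : predIn tests p1 = true
      · rw [if_pos hq, if_pos hq]
        simp only [List.map_cons, hbb, Bool.false_eq_true, if_false]
        rw [ih]
      · rw [if_neg hq, if_neg hq]
        exact ih

lemma renderL_map_rep_skip {tests : List String} {b : String} {v : Nat × List Char × List Char}
    (hp : predIn tests b = false) :
    ∀ l : List (String × (Nat × List Char × List Char)),
      renderL tests (l.map (fun p => if p.1 == b then (b, v) else p)) = renderL tests l := by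
  intro l
  have hp' : ¬ predIn tests b = true := by simp [hp]
  induction l with
  | nil => simp [renderL]
  | cons p l ih =>
    obtain ⟨p1, pv⟩ := p
    simp only [List.map_cons]
    by_cases hb : p1 = b
    · subst hb
      simp only [beq_self_eq_true, if_true]
      simp only [renderL]
      rw [if_neg hp', if_neg hp']
      exact ih
    · have hbb : (p1 == b) = false := by simp [hb]
      simp only [hbb, Bool.false_eq_true, if_false]
      simp only [renderL]
      by_cases hq : predIn tests p1 = true
      · rw [if_pos hq, if_pos hq]
        rw [ih]
      · rw [if_neg hq, if_neg hq]
        exact ih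

lemma renderD_insert (tests : List String) (dB : PySem.Dict String (Nat × List Char × List Char))
    (b : String) (v : Nat × List Char × List Char) (hp : predIn tests b = true)
    (hnd : dB.keys.Nodup) :
    renderD tests (dB.insert b v) = (renderD tests dB).insert b (preChain v.1 v.2.1 v.2.2) := by
  apply PySem.Dict.ext
  by_cases hc : dB.contains b = true
  · have hrc : (renderD tests dB).contains b = true := by
      rw [PySem.Dict.contains_iff_mem_keys] at hc ⊢
      unfold renderD
      rw [PySem.Dict.keys_mk]
      apply mem_fst_renderL_of hp
      obtain ⟨l⟩ := dB
      simpa [PySem.Dict.keys_mk] using hc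
    rw [PySem.Dict.items_insert_of_contains _ _ hrc]
    show renderL tests (dB.insert b v).items = _
    rw [PySem.Dict.items_insert_of_contains dB v hc]
    exact renderL_map_rep hp dB.items
  · have hc' : dB.contains b = false := by simpa using hc
    have hrc : (renderD tests dB).contains b = false := by
      rw [← Bool.not_eq_true]
      intro hx
      rw [PySem.Dict.contains_iff_mem_keys] at hx
      unfold renderD at hx
      rw [PySem.Dict.keys_mk] at hx
      rcases List.mem_map.mp hx with ⟨x, hxm, hx1⟩
      have hbk : b ∈ dB.items.map (fun p => p.1) := hx1 ▸ mem_fst_renderL hxm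
      have : dB.contains b = true :=
        (PySem.Dict.contains_iff_mem_keys dB b).mpr (by simpa [PySem.Dict.keys] using hbk)
      rw [this] at hc'
      simp at hc'
    rw [PySem.Dict.items_insert_of_not_contains _ _ hrc]
    show renderL tests (dB.insert b v).items = _
    rw [PySem.Dict.items_insert_of_not_contains dB v hc', renderL_append]
    rw [renderL, if_pos hp]
    rfl

lemma renderD_insert_skip (tests : List String)
    (dB : PySem.Dict String (Nat × List Char × List Char)) (b : String)
    (v : Nat × List Char × List Char) (hp : predIn tests b = false) :
    renderD tests (dB.insert b v) = renderD tests dB := by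
  have hp' : ¬ predIn tests b = true := by simp [hp]
  apply PySem.Dict.ext
  show renderL tests (dB.insert b v).items = renderL tests dB.items
  by_cases hc : dB.contains b = true
  · rw [PySem.Dict.items_insert_of_contains dB v hc]
    exact renderL_map_rep_skip hp dB.items
  · rw [PySem.Dict.items_insert_of_not_contains dB v (by simpa using hc), renderL_append]
    rw [renderL, if_neg hp', renderL]
    simp

lemma stepB_nodup (st : PySem.Dict String (Nat × List Char × List Char) × List String)
    (t : String) (h : st.1.keys.Nodup) : ((stepB st t).1).keys.Nodup := by
  simp only [stepB]
  split
  · exact h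
  · split
    · exact h
    · split
      · exact PySem.Dict.nodup_keys_insert _ _ _ h
      · split
        · exact PySem.Dict.nodup_keys_insert _ _ _ h
        · exact h

lemma step_eq (tests : List String) (dB : PySem.Dict String (Nat × List Char × List Char))
    (o : List String) (t : String) (hnd : dB.keys.Nodup) :
    stepA tests (renderD tests dB, o) t =
      (renderD tests (stepB (dB, o) t).1, (stepB (dB, o) t).2) := by
  have hge : (-1 : Int) ≤ PySem.Str.find t "." := by
    rw [PySem.Str.find_eq]; exact PySem.Chars.neg_one_le_find _ _
  by_cases hd : PySem.Str.find t "." < 0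
  · have h0 : PySem.Str.find t "." = -1 := by omega
    have hm0 : max (PySem.Str.find t "." + 1) 0 = 0 := by rw [h0]; decide
    have hd0 : decide (PySem.Str.find t "." < 0) = true := by rw [h0]; decide
    have hlt : decide ((0 : Int) < 0) = false := by decide
    simp only [stepA, stepB, hm0, hd0, hlt, Bool.false_and, Bool.false_eq_true, if_false,
      eq_self_iff_true, if_true]
  · have hd' : (0 : Int) ≤ PySem.Str.find t "." := by omega
    have hdec : decide (PySem.Str.find t "." < 0) = false := by
      simp only [decide_eq_false_iff_not]; omega
    have hmax : max (PySem.Str.find t "." + 1) 0 = PySem.Str.find t "." + 1 := by omega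
    have hpos : decide ((0 : Int) < PySem.Str.find t "." + 1) = true := by
      simp only [decide_eq_true_eq]; omega
    rcases hsp : stripPre (PySem.List.slice t.toList (some (PySem.Str.find t "." + 1)) none)
      with ⟨k, n⟩
    have hB : preB_depth (PySem.List.slice t.toList (some (PySem.Str.find t "." + 1)) none) 0
        = (k, n) := by rw [preB_depth_eq, hsp]; simp
    cases k with
    | zero =>
      have hsw := startswith_false_of_stripPre_zero (by rw [hsp] : (stripPre
        (PySem.List.slice t.toList (some (PySem.Str.find t "." + 1)) none)).1 = 0)
      simp only [stepA, stepB, hmax, hdec, hB, hsw, Bool.and_false, Bool.false_eq_true,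
        if_false, eq_self_iff_true, if_true]
    | succ k0 =>
      have hsw : PySem.Chars.startswith
          (PySem.List.slice t.toList (some (PySem.Str.find t "." + 1)) none)
          GroupPreTests_prefix.toList = true :=
        startswith_of_stripPre_pos (by rw [hsp]; simp)
      have hsub : PySem.Str.find t "." + 1 - 1 = PySem.Str.find t "." := by ring
      have hfind0 : (0 : Int) ≤ PySem.Chars.find t.toList ".".toList := by
        rw [← PySem.Str.find_eq]; exact hd'
      obtain ⟨tl, htl⟩ := (PySem.Chars.find_spec hfind0).1
      have hdotchar : List.drop (PySem.Str.find t ".").toNat t.toList = '.' :: tl := by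
        rw [PySem.Str.find_eq, ← htl]; rfl
      have hnm_eq : PySem.List.slice t.toList (some (PySem.Str.find t "." + 1)) none = tl := by
        rw [PySem.List.slice_from _ (by omega : (0 : Int) ≤ PySem.Str.find t "." + 1)]
        have h1 : (PySem.Str.find t "." + 1).toNat = (PySem.Str.find t ".").toNat + 1 := by omega
        rw [h1, ← List.tail_drop, hdotchar]
        rfl
      have hsuite : PySem.List.slice t.toList none (some (PySem.Str.find t "."))
          = t.toList.take (PySem.Str.find t ".").toNat :=
        PySem.List.slice_to _ hd'
      have hrecon : preRep (k0 + 1) ++ n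
          = PySem.List.slice t.toList (some (PySem.Str.find t "." + 1)) none := by
        have h2 := stripPre_recon (PySem.List.slice t.toList (some (PySem.Str.find t "." + 1)) none)
        rw [hsp] at h2; exact h2
      have ht : t.toList = PySem.List.slice t.toList none (some (PySem.Str.find t "."))
          ++ '.' :: (preRep (k0 + 1) ++ n) := by
        rw [hsuite, hrecon, hnm_eq]
        conv_lhs => rw [← List.take_append_drop (PySem.Str.find t ".").toNat t.toList]
        rw [hdotchar]
      have hA_while := preA_while_eq
        (PySem.List.slice t.toList (some (PySem.Str.find t "." + 1)) none)
        (PySem.List.slice t.toList none (some (PySem.Str.find t "."))) t.toList [t.toList]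
      rw [hsp] at hA_while
      rw [if_neg (Nat.succ_ne_zero k0)] at hA_while
      set suite := PySem.List.slice t.toList none (some (PySem.Str.find t ".")) with hsuitedef
      have hval : (t.toList :: chainTail suite n (k0 + 1)).map String.ofList
          = preChain (k0 + 1) suite n := by
        rw [preChain_eq, List.map_cons, ht]
      have hget := get?_renderD tests dB (String.ofList (suite ++ '.' :: n)) hnd
      -- resolve all branch structure
      simp only [stepA, stepB, hmax, hsub, hdec, Bool.false_eq_true, if_false, hB, hpos, hsw,
        Bool.and_self, Nat.succ_ne_zero, eq_self_iff_true, if_true]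
      rw [← hsuitedef]
      rw [hA_while]
      simp only [List.singleton_append]
      rw [predIn_eq tests (String.ofList (suite ++ '.' :: n)), hget]
      by_cases hp : predIn tests (String.ofList (suite ++ '.' :: n)) = true
      · rw [if_pos hp]
        cases hg : dB.get? (String.ofList (suite ++ '.' :: n)) with
        | none =>
          have hins := renderD_insert tests dB (String.ofList (suite ++ '.' :: n))
            (k0 + 1, suite, n) hp hnd
          dsimp only [Option.map]
          rw [hp]
          simp only [Bool.and_self, eq_self_iff_true, if_true]
          rw [hins]
          dsimp only
          rw [hval]
        | some q =>
          obtain ⟨q1, qr⟩ := q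
          have hins := renderD_insert tests dB (String.ofList (suite ++ '.' :: n))
            (k0 + 1, suite, n) hp hnd
          dsimp only [Option.map]
          simp only [length_preChain, List.length_cons, length_chainTail]
          by_cases hq : q1 < k0 + 1
          · have hdq : decide (q1 + 1 < (k0 + 1) + 1) = true := by
              simp only [decide_eq_true_eq]; omega
            simp only [hdq, hp, Bool.and_self, eq_self_iff_true, if_true]
            rw [if_pos hq, hins]
            dsimp only
            rw [hval]
          · have hdq : decide (q1 + 1 < (k0 + 1) + 1) = false := by
              simp only [decide_eq_false_iff_not]; omega
            simp only [hdq, Bool.and_false, Bool.false_eq_true, if_false]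
            rw [if_neg hq]
      · have hp' : predIn tests (String.ofList (suite ++ '.' :: n)) = false := by
          simpa using hp
        rw [if_neg hp]
        simp only [hp', Bool.false_and, Bool.false_eq_true, if_false]
        cases hg : dB.get? (String.ofList (suite ++ '.' :: n)) with
        | none =>
          dsimp only
          rw [renderD_insert_skip tests dB (String.ofList (suite ++ '.' :: n))
            (k0 + 1, suite, n) hp']
        | some q =>
          dsimp only
          by_cases hq : q.1 < k0 + 1
          · rw [if_pos hq]
            dsimp only
            rw [renderD_insert_skip tests dB (String.ofList (suite ++ '.' :: n))
              (k0 + 1, suite, n) hp']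
          · rw [if_neg hq]

lemma foldAB (tests : List String) (l : List String) :
    ∀ (dB : PySem.Dict String (Nat × List Char × List Char)) (o : List String),
      dB.keys.Nodup →
      l.foldl (stepA tests) (renderD tests dB, o) =
        (renderD tests (l.foldl stepB (dB, o)).1, (l.foldl stepB (dB, o)).2) := by
  induction l with
  | nil => intro dB o _; simp
  | cons t l ih =>
    intro dB o hnd
    simp only [List.foldl_cons]
    rw [step_eq tests dB o t hnd]
    have h2 := stepB_nodup (dB, o) t hnd
    have h3 := ih (stepB (dB, o) t).1 (stepB (dB, o) t).2 h2
    simpa using h3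

lemma foldB_nodup (l : List String) :
    ∀ (dB : PySem.Dict String (Nat × List Char × List Char)) (o : List String),
      dB.keys.Nodup → ((l.foldl stepB (dB, o)).1).keys.Nodup := by
  induction l with
  | nil => intro dB o h; simpa using h
  | cons t l ih =>
    intro dB o hnd
    simp only [List.foldl_cons]
    have h2 := stepB_nodup (dB, o) t hnd
    have h3 := ih (stepB (dB, o) t).1 (stepB (dB, o) t).2 h2
    simpa using h3

lemma second_pass (tests : List String) (l : List (String × (Nat × List Char × List Char))) :
    ∀ d : PySem.Dict String (List String),
      (l.map (fun p => p.1)).Nodup → (∀ p ∈ l, d.contains p.1 = false) →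
      (l.foldl
        (fun d p =>
          if PySem.Set.contains (PySem.Set.ofList tests) p.1 then
            d.insert p.1 (preChain p.2.1 p.2.2.1 p.2.2.2)
          else d) d).items = d.items ++ renderL tests l := by
  induction l with
  | nil => intro d _ _; simp [renderL]
  | cons p l ih =>
    intro d hnd hfresh
    obtain ⟨p1, pv⟩ := p
    simp only [List.map_cons, List.nodup_cons] at hnd
    simp only [List.foldl_cons]
    by_cases hp : PySem.Set.contains (PySem.Set.ofList tests) p1 = true
    · rw [if_pos hp]
      have hc : d.contains p1 = false := hfresh (p1, pv) (by simp)
      rw [ih (d.insert p1 (preChain pv.1 pv.2.1 pv.2.2)) hnd.2 ?fresh]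
      case fresh =>
        intro q hq
        rw [PySem.Dict.contains_insert]
        have hne : q.1 ≠ p1 := by
          intro he
          exact hnd.1 (he ▸ List.mem_map_of_mem hq)
        have hcq : d.contains q.1 = false := hfresh q (by simp [hq])
        simp [hne, hcq]
      rw [PySem.Dict.items_insert_of_not_contains d _ hc]
      rw [renderL, if_pos (show predIn tests p1 = true from hp)]
      simp
    · rw [if_neg hp]
      rw [ih d hnd.2 (fun q hq => hfresh q (by simp [hq]))]
      rw [renderL, if_neg (show ¬ predIn tests p1 = true from hp)]

-- ===== VERDICT (by name: the statement is the Claim_ definition above) =====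
theorem GroupPreTests_py_spec : Claim_equal_GroupPreTests_py := by
  intro tests _
  show GroupPreTests_py tests = GroupPreTests_py_alt tests
  have e1 : GroupPreTests_py tests =
      ((tests.foldl (stepA tests) (PySem.Dict.empty, [])).1.items,
        (tests.foldl (stepA tests) (PySem.Dict.empty, [])).2) := rfl
  have e2 : GroupPreTests_py_alt tests =
      (((tests.foldl stepB (PySem.Dict.empty, [])).1.items.foldl
          (fun d p =>
            if PySem.Set.contains (PySem.Set.ofList tests) p.1 then
              d.insert p.1 (preChain p.2.1 p.2.2.1 p.2.2.2)
            else d) PySem.Dict.empty).items,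
        (tests.foldl stepB (PySem.Dict.empty, [])).2) := rfl
  have hA2 : List.foldl (stepA tests) (PySem.Dict.empty, []) tests =
      (renderD tests (List.foldl stepB (PySem.Dict.empty, []) tests).1,
        (List.foldl stepB (PySem.Dict.empty, []) tests).2) :=
    foldAB tests tests PySem.Dict.empty [] PySem.Dict.nodup_keys_empty
  have hnd := foldB_nodup tests PySem.Dict.empty [] PySem.Dict.nodup_keys_empty
  have hnd' : ((List.foldl stepB (PySem.Dict.empty, []) tests).1.items.map
      (fun p => p.1)).Nodup := by
    simpa [PySem.Dict.keys] using hnd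
  have h2 := second_pass tests (List.foldl stepB (PySem.Dict.empty, []) tests).1.items
    PySem.Dict.empty hnd' (fun p _ => PySem.Dict.contains_empty p.1)
  rw [e1, e2, hA2, h2]
  rfl
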